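-- pv_equiv track=rewrite | github.com/sonambharti/Interview | Unacademy/Q1distributeBags.py | distributeBags
-- ===== SOURCE A (Python) =====
-- def distributeBags(N, K):
-- 	result = [0] * K # initialize a list of K elements with zero bags
-- 	indx = 0
-- 	while N > 0: # loop until we have no more bags to distribute
-- 		bag_to_store = min(N, indx+1)
-- 		result[indx % K] += bag_to_store # distribute bags to the i-th slot
-- 		N -= bag_to_store # subtract the distributed bags from N
-- 		indx += 1 # move to the next slots
-- 	return result
-- ===== SOURCE B (Python) =====
-- def distributeBags(N, K):
--     if N <= 0:
--         return [0] * K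
--     # m = largest number of full steps: m*(m+1)//2 <= N (binary search)
--     hi = 1
--     while hi * (hi + 1) // 2 <= N:
--         hi *= 2
--     lo = 0
--     while lo < hi:
--         mid = (lo + hi + 1) // 2
--         if mid * (mid + 1) // 2 <= N:
--             lo = mid
--         else:
--             hi = mid - 1
--     m = lo
--     r = N - m * (m + 1) // 2
--     result = []
--     for j in range(K):
--         c = (m - j + K - 1) // K  # number of full steps landing on slot j
--         result.append(c * (j + 1) + K * c * (c - 1) // 2)
--     if r > 0:
--         result[m % K] += r
--     return result
-- ===== Notes on version B (the rewrite author's own statement) =====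
-- stated objective: alternative
-- what changed: A loops step by step adding min(N, i+1) to slot i%K until N is exhausted; B finds the number m of full steps by binary search on the triangular numbers, fills each slot with an arithmetic-series closed form over its residue class, and adds the final partial step, so the loop over steps disappears.
import Mathlib
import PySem

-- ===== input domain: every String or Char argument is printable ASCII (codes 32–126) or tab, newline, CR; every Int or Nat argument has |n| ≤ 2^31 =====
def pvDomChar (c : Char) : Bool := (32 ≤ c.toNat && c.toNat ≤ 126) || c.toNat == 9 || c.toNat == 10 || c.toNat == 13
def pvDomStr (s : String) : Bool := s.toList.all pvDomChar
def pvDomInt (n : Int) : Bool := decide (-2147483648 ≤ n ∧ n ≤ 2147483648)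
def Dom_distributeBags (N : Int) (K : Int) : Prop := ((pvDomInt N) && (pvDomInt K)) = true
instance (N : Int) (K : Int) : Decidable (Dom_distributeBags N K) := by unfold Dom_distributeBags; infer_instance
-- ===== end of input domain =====

-- B replaces A's step-by-step distribution loop over individual steps by a binary search for the
-- number of full steps plus an arithmetic-series closed form per residue slot (a different algorithm, similar measured cost).


-- ===== PORT A =====
-- the while-loop of A: state (result, indx, N); 'result[indx % K] += bag' raises in
-- Python when K = 0 (ZeroDivisionError) or the index is out of range (IndexError) —
-- those inputs are excluded by Pre_; the early returns below only totalize those cases.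
-- structural recursion on a fuel counter (N.toNat steps always suffice: each pass removes ≥ 1 bag)
def pvALoop (K : Int) : Nat → List Int → Nat → Int → List Int
  | 0, result, _, _ => result
  | fuel + 1, result, indx, N =>
    if 0 < N then
      let bag := min N ((indx : Int) + 1)
      if K = 0 then result
      else
        let i := PySem.Int.mod (indx : Int) K
        if PySem.Raise.InRange result.length i then
          pvALoop K fuel (PySem.List.pySetD result i (PySem.List.pyGetD result i 0 + bag)) (indx + 1) (N - bag)
        else result
    else result

def distributeBags (N : Int) (K : Int) : List Int :=
  pvALoop K N.toNat (List.replicate K.toNat 0) 0 N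

-- ===== PORT B =====
-- 'while hi*(hi+1)//2 <= N: hi *= 2'  (fuel only totalizes; N.toNat steps always suffice)
def pvGrow (N : Int) : Nat → Int → Int
  | 0, hi => hi
  | fuel + 1, hi =>
    if PySem.Int.floordiv (hi * (hi + 1)) 2 ≤ N then pvGrow N fuel (hi * 2) else hi

-- 'while lo < hi: mid = (lo+hi+1)//2; …'  (fuel only totalizes; (hi-lo).toNat steps suffice)
def pvBin (N : Int) : Nat → Int → Int → Int
  | 0, lo, _ => lo
  | fuel + 1, lo, hi =>
    if lo < hi then
      let mid := PySem.Int.floordiv (lo + hi + 1) 2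
      if PySem.Int.floordiv (mid * (mid + 1)) 2 ≤ N then pvBin N fuel mid hi
      else pvBin N fuel lo (mid - 1)
    else lo

def distributeBags_alt (N : Int) (K : Int) : List Int :=
  if N ≤ 0 then List.replicate K.toNat 0
  else
    let hi := pvGrow N N.toNat 1
    let m := pvBin N hi.toNat 0 hi
    let r := N - PySem.Int.floordiv (m * (m + 1)) 2
    let result := (PySem.List.pyRange 0 K 1).map (fun j =>
      let c := PySem.Int.floordiv (m - j + K - 1) K
      c * (j + 1) + PySem.Int.floordiv (K * c * (c - 1)) 2)
    if 0 < r then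
      PySem.List.pySetD result (PySem.Int.mod m K)
        (PySem.List.pyGetD result (PySem.Int.mod m K) 0 + r)
    else result

-- ===== PRECONDITION & SPEC =====
-- Pre_ excludes exactly the inputs (N > 0 with K ≤ 0) on which A raises
-- ZeroDivisionError (K = 0) or IndexError (K < 0) at 'result[indx % K]'.
def Pre_distributeBags (N : Int) (K : Int) : Prop := 0 < K ∨ N ≤ 0
instance (N : Int) (K : Int) : Decidable (Pre_distributeBags N K) := by unfold Pre_distributeBags; infer_instance
def pvWitness_distributeBags : Int × Int := (10, 3)

def Spec_distributeBags (N : Int) (K : Int) (out : List Int) : Prop := out = distributeBags_alt N K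
instance (N : Int) (K : Int) (out : List Int) : Decidable (Spec_distributeBags N K out) := by unfold Spec_distributeBags; infer_instance

-- ===== CLAIM (what is proved, stated in full; the proofs are below) =====
def Claim_equal_distributeBags : Prop := ∀ (N : Int) (K : Int), Dom_distributeBags N K → Pre_distributeBags N K → Spec_distributeBags N K (distributeBags N K)


-- ===== LEMMAS AND PROOFS =====

-- per-slot amount A's loop adds from state (indx, N)
def pvSpent (K : Int) : Nat → Nat → Int → Nat → Int
  | 0, _, _, _ => 0
  | fuel + 1, indx, N, j =>
    if 0 < N then
      let bag := min N ((indx : Int) + 1)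
      (if (PySem.Int.mod (indx : Int) K).toNat = j then bag else 0) + pvSpent K fuel (indx + 1) (N - bag) j
    else 0

-- total bags consumed by m full steps starting at step indx
def pvStepSum (indx m : Nat) : Int :=
  match m with
  | 0 => 0
  | m + 1 => ((indx : Int) + 1) + pvStepSum (indx + 1) m

-- per-slot amount added by m full steps starting at step indx
def pvFull (K : Int) (indx m j : Nat) : Int :=
  match m with
  | 0 => 0
  | m + 1 => (if indx % K.toNat = j then ((indx : Int) + 1) else 0) + pvFull K (indx + 1) m j

theorem pvStepSum_nonneg (indx m : Nat) : 0 ≤ pvStepSum indx m := by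
  induction m generalizing indx with
  | zero => simp [pvStepSum]
  | succ m ih => have := ih (indx + 1); simp [pvStepSum]; omega

theorem pvStepSum_two_mul (m indx : Nat) :
    2 * pvStepSum indx m = ((indx : Int) + m) * ((indx : Int) + m + 1) - (indx : Int) * ((indx : Int) + 1) := by
  induction m generalizing indx with
  | zero => simp [pvStepSum]
  | succ m ih =>
    have := ih (indx + 1)
    simp only [pvStepSum]
    push_cast at this ⊢
    linarith [this]
    
theorem pvModNat (K : Int) (hK : 0 < K) (indx : Nat) :
    PySem.Int.mod (indx : Int) K = ((indx % K.toNat : Nat) : Int) := by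
  have h : K = ((K.toNat : Nat) : Int) := by omega
  rw [h, PySem.Int.mod_natCast]; simp

theorem pvGetD_set (l : List Int) (n j : Nat) (v : Int) (hn : n < l.length) :
    (l.set n v).getD j 0 = if n = j then v else l.getD j 0 := by
  simp only [List.getD_eq_getElem?_getD, List.getElem?_set, hn, if_true]
  split_ifs <;> simp

theorem pvInRange (K : Int) (hK : 0 < K) (len : Nat) (hlen : len = K.toNat) (indx : Nat) :
    PySem.Raise.InRange len (PySem.Int.mod (indx : Int) K) := by
  have h1 := PySem.Int.mod_nonneg (indx : Int) hK
  have h2 := PySem.Int.mod_lt (indx : Int) hK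
  simp only [PySem.Raise.InRange]
  omega

theorem pvALoop_len (K : Int) (hK : 0 < K) : ∀ (fuel : Nat) (result : List Int) (indx : Nat) (N : Int),
    result.length = K.toNat → (pvALoop K fuel result indx N).length = K.toNat := by
  intro fuel
  induction fuel with
  | zero => intro result indx N hlen; exact hlen
  | succ fuel ih =>
    intro result indx N hlen
    rw [pvALoop]
    by_cases h : 0 < N
    · rw [if_pos h, if_neg (by omega : ¬ K = 0),
        if_pos (pvInRange K hK result.length hlen indx)]
      exact ih _ _ _ (by rw [PySem.List.length_pySetD]; exact hlen)
    · rw [if_neg h]; exact hlen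

theorem pvALoop_getD (K : Int) (hK : 0 < K) : ∀ (fuel : Nat) (result : List Int) (indx : Nat) (N : Int),
    result.length = K.toNat → ∀ j : Nat,
    (pvALoop K fuel result indx N).getD j 0 = result.getD j 0 + pvSpent K fuel indx N j := by
  intro fuel
  induction fuel with
  | zero => intro result indx N hlen j; rw [pvALoop, pvSpent]; ring
  | succ fuel ih =>
    intro result indx N hlen j
    rw [pvALoop, pvSpent]
    by_cases h : 0 < N
    · rw [if_pos h, if_pos h, if_neg (by omega : ¬ K = 0),
        if_pos (pvInRange K hK result.length hlen indx)]
      rw [ih _ _ _ (by rw [PySem.List.length_pySetD]; exact hlen) j]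
      have hi : PySem.Int.mod (indx : Int) K = ((indx % K.toNat : Nat) : Int) := pvModNat K hK indx
      have hn : indx % K.toNat < result.length := by
        have := Nat.mod_lt indx (by omega : 0 < K.toNat)
        omega
      rw [hi, PySem.List.pySetD_natCast, PySem.List.pyGetD_natCast]
      rw [pvGetD_set result _ j _ hn]
      simp only [Int.toNat_natCast]
      by_cases hcj : indx % K.toNat = j
      · rw [if_pos hcj, if_pos hcj, hcj]
        ring
      · rw [if_neg hcj, if_neg hcj]
        ring
    · rw [if_neg h, if_neg h]; ring

theorem pvSpent_fuel_zero (K : Int) (fuel indx : Nat) (j : Nat) :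
    pvSpent K fuel indx 0 j = 0 := by
  cases fuel <;> simp [pvSpent]

theorem pvSpent_decomp (K : Int) (hK : 0 < K) (j : Nat) :
    ∀ (m indx fuel : Nat) (r : Int), 0 ≤ r → r ≤ (indx : Int) + m →
    pvStepSum indx m + r ≤ (fuel : Int) →
    pvSpent K fuel indx (pvStepSum indx m + r) j =
      pvFull K indx m j + (if 0 < r ∧ (indx + m) % K.toNat = j then r else 0) := by
  intro m
  induction m with
  | zero =>
    intro indx fuel r hr0 hrle hfuel
    by_cases hpos : 0 < r
    · simp only [pvStepSum, zero_add, Nat.add_zero] at *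
      obtain ⟨fuel, rfl⟩ : ∃ f, fuel = f + 1 := ⟨fuel - 1, by omega⟩
      rw [pvSpent]
      simp only [if_pos hpos]
      have hbag : min r ((indx : Int) + 1) = r := by omega
      rw [hbag, sub_self, pvModNat K hK, Int.toNat_natCast, pvSpent_fuel_zero]
      simp only [pvFull, hpos, true_and, add_zero, zero_add]
    · have hr : r = 0 := by omega
      subst hr
      simp only [pvStepSum, pvFull, add_zero, zero_add]
      rw [pvSpent_fuel_zero]
      simp
  | succ m ih =>
    intro indx fuel r hr0 hrle hfuel
    have hsum := pvStepSum_nonneg (indx + 1) m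
    have hN : pvStepSum indx (m + 1) + r = ((indx : Int) + 1) + (pvStepSum (indx + 1) m + r) := by
      simp only [pvStepSum]; ring
    have hpos : 0 < (indx : Int) + 1 + (pvStepSum (indx + 1) m + r) := by omega
    obtain ⟨fuel, rfl⟩ : ∃ f, fuel = f + 1 := ⟨fuel - 1, by rw [hN] at hfuel; omega⟩
    rw [hN, pvSpent]
    simp only [if_pos hpos]
    have hbag : min ((indx : Int) + 1 + (pvStepSum (indx + 1) m + r)) ((indx : Int) + 1) = (indx : Int) + 1 := by omega
    rw [hbag, show (indx : Int) + 1 + (pvStepSum (indx + 1) m + r) - ((indx : Int) + 1) = pvStepSum (indx + 1) m + r from by ring]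
    rw [ih (indx + 1) fuel r hr0 (by push_cast at hrle ⊢; omega) (by rw [hN] at hfuel; push_cast at hfuel ⊢; omega)]
    rw [pvModNat K hK, Int.toNat_natCast]
    rw [show pvFull K indx (m + 1) j = (if indx % K.toNat = j then ((indx : Int) + 1) else 0) + pvFull K (indx + 1) m j from rfl]
    rw [show indx + 1 + m = indx + (m + 1) from by omega]
    ring

theorem pvTriEven (x : Int) : 2 * PySem.Int.floordiv (x * (x + 1)) 2 = x * (x + 1) := by
  rw [PySem.Int.floordiv_eq_ediv_of_pos (by norm_num)]
  obtain ⟨k, hk⟩ := Int.even_mul_succ_self x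
  omega

theorem pvKccEven (K c : Int) : 2 * PySem.Int.floordiv (K * c * (c - 1)) 2 = K * c * (c - 1) := by
  rw [PySem.Int.floordiv_eq_ediv_of_pos (by norm_num)]
  obtain ⟨k, hk⟩ := Int.even_mul_succ_self (c - 1)
  have h1 : (c - 1) * (c - 1 + 1) = k + k := hk
  have : K * c * (c - 1) = 2 * (K * k) := by linear_combination K * h1
  omega

theorem pvTri_mono (a b : Int) (h0 : 0 ≤ a) (hab : a ≤ b) :
    PySem.Int.floordiv (a * (a + 1)) 2 ≤ PySem.Int.floordiv (b * (b + 1)) 2 := by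
  have ha := pvTriEven a
  have hb := pvTriEven b
  nlinarith

theorem pvGrow_spec (N : Int) : ∀ (fuel : Nat) (hi : Int), 0 < hi → (N + 1 - hi).toNat ≤ fuel →
    0 < pvGrow N fuel hi ∧ ¬ PySem.Int.floordiv (pvGrow N fuel hi * (pvGrow N fuel hi + 1)) 2 ≤ N := by
  intro fuel
  induction fuel with
  | zero =>
    intro hi hpos hfuel
    have hge : N + 1 ≤ hi := by omega
    rw [pvGrow]
    refine ⟨hpos, fun hle => ?_⟩
    have := pvTriEven hi
    nlinarith
  | succ fuel ih =>
    intro hi hpos hfuel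
    rw [pvGrow]
    by_cases h : PySem.Int.floordiv (hi * (hi + 1)) 2 ≤ N
    · rw [if_pos h]
      have hhiN : hi ≤ N := by
        have := pvTriEven hi
        nlinarith
      exact ih (hi * 2) (by omega) (by omega)
    · rw [if_neg h]
      exact ⟨hpos, h⟩

theorem pvBin_spec (N : Int) : ∀ (fuel : Nat) (lo hi : Int),
    PySem.Int.floordiv (lo * (lo + 1)) 2 ≤ N →
    ¬ PySem.Int.floordiv ((hi + 1) * (hi + 1 + 1)) 2 ≤ N →
    lo ≤ hi → 0 ≤ lo → (hi - lo).toNat ≤ fuel →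
    PySem.Int.floordiv (pvBin N fuel lo hi * (pvBin N fuel lo hi + 1)) 2 ≤ N ∧
    ¬ PySem.Int.floordiv ((pvBin N fuel lo hi + 1) * (pvBin N fuel lo hi + 1 + 1)) 2 ≤ N ∧
    0 ≤ pvBin N fuel lo hi := by
  intro fuel
  induction fuel with
  | zero =>
    intro lo hi h1 h2 h3 h4 hfuel
    have : lo = hi := by omega
    rw [pvBin]
    exact ⟨h1, this ▸ h2, h4⟩
  | succ fuel ih =>
    intro lo hi h1 h2 h3 h4 hfuel
    rw [pvBin]
    by_cases h : lo < hi
    · rw [if_pos h]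
      have hmid : lo < PySem.Int.floordiv (lo + hi + 1) 2 ∧ PySem.Int.floordiv (lo + hi + 1) 2 ≤ hi := by
        have := PySem.Int.floordiv_eq_ediv_of_pos (a := lo + hi + 1) (b := 2) (by norm_num)
        rw [this]; omega
      set mid := PySem.Int.floordiv (lo + hi + 1) 2 with hmiddef
      by_cases hle : PySem.Int.floordiv (mid * (mid + 1)) 2 ≤ N
      · rw [if_pos hle]
        exact ih mid hi hle h2 hmid.2 (by omega) (by omega)
      · rw [if_neg hle]
        refine ih lo (mid - 1) h1 ?_ (by omega) h4 (by omega)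
        have : (mid - 1 + 1) * (mid - 1 + 1 + 1) = mid * (mid + 1) := by ring
        rw [this]
        exact hle
    · rw [if_neg h]
      have : lo = hi := by omega
      exact ⟨h1, this ▸ h2, h4⟩

theorem pvModEq (K : Int) (hK : 0 < K) (j m : Nat) (hj : j < K.toNat) :
    m % K.toNat = j ↔ ∃ q : Nat, (m : Int) - j = q * K := by
  obtain ⟨k, rfl, hk⟩ : ∃ k : Nat, K = (k : Int) ∧ K.toNat = k := ⟨K.toNat, by omega, rfl⟩
  rw [hk] at hj ⊢
  constructor
  · intro h
    refine ⟨m / k, ?_⟩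
    have hdm : (m : Int) = (k : Int) * ((m / k : Nat) : Int) + j := by
      exact_mod_cast congrArg (Nat.cast : Nat → Int) (show m = k * (m / k) + j by
        have := Nat.div_add_mod m k; omega)
    linear_combination hdm
  · rintro ⟨q, hq⟩
    have hm : m = j + q * k := by
      have : ((m : Nat) : Int) = ((j + q * k : Nat) : Int) := by push_cast; linarith
      exact_mod_cast this
    rw [hm, Nat.add_mul_mod_self_right]
    exact Nat.mod_eq_of_lt hj

theorem pvFull_succ_right (K : Int) (j : Nat) : ∀ (m indx : Nat),
    pvFull K indx (m + 1) j =
      pvFull K indx m j + (if (indx + m) % K.toNat = j then ((indx : Int) + m + 1) else 0) := by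
  intro m
  induction m with
  | zero => intro indx; simp [pvFull]
  | succ m ih =>
    intro indx
    rw [pvFull, ih (indx + 1)]
    conv_rhs => rw [pvFull]
    rw [show indx + 1 + m = indx + (m + 1) from by omega]
    by_cases hc : (indx + (m + 1)) % K.toNat = j
    · simp only [hc, if_pos]; push_cast; ring
    · simp only [if_neg hc]; ring

theorem pvFull_closed (K : Int) (hK : 0 < K) (j : Nat) (hj : j < K.toNat) : ∀ (m : Nat),
    pvFull K 0 m j =
      PySem.Int.floordiv ((m : Int) - j + K - 1) K * ((j : Int) + 1) +
        PySem.Int.floordiv (K * PySem.Int.floordiv ((m : Int) - j + K - 1) K *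
          (PySem.Int.floordiv ((m : Int) - j + K - 1) K - 1)) 2 := by
  have hjK : (j : Int) < K := by omega
  intro m
  induction m with
  | zero =>
    have hc0 : PySem.Int.floordiv (((0 : Nat) : Int) - j + K - 1) K = 0 := by
      rw [PySem.Int.floordiv_eq_iff_of_pos hK]
      push_cast
      constructor <;> nlinarith
    rw [hc0]
    have h0 : K * 0 * (0 - 1) = 0 := by ring
    rw [h0, show PySem.Int.floordiv 0 2 = 0 from by rw [PySem.Int.floordiv_eq_ediv_of_pos (by norm_num)]; simp]
    simp [pvFull]
  | succ m ih =>
    rw [pvFull_succ_right K j m 0]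
    simp only [Nat.cast_zero, zero_add, ih]
    by_cases hc : m % K.toNat = j
    · obtain ⟨q, hq⟩ := (pvModEq K hK j m hj).mp hc
      have hcq : PySem.Int.floordiv ((m : Int) - j + K - 1) K = (q : Int) := by
        rw [PySem.Int.floordiv_eq_iff_of_pos hK]
        constructor <;> nlinarith
      have hcq' : PySem.Int.floordiv (((m + 1 : Nat) : Int) - j + K - 1) K = (q : Int) + 1 := by
        rw [PySem.Int.floordiv_eq_iff_of_pos hK]
        push_cast
        constructor <;> nlinarith
      rw [hcq, hcq', if_pos hc]
      have e0 := pvKccEven K (q : Int)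
      have e1 := pvKccEven K ((q : Int) + 1)
      have h2 : 2 * ((q : Int) * ((j : Int) + 1) + PySem.Int.floordiv (K * (q : Int) * ((q : Int) - 1)) 2 + ((m : Int) + 1)) =
          2 * (((q : Int) + 1) * ((j : Int) + 1) + PySem.Int.floordiv (K * ((q : Int) + 1) * ((q : Int) + 1 - 1)) 2) := by
        linear_combination e0 - e1 + 2 * hq
      omega
    · have hbr := (PySem.Int.floordiv_eq_iff_of_pos (q := PySem.Int.floordiv ((m : Int) - j + K - 1) K) hK).mp rfl
      set c := PySem.Int.floordiv ((m : Int) - j + K - 1) K with hcdef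
      have hc0 : 0 ≤ c := by nlinarith [hbr.1, hbr.2]
      have hlt : (m : Int) - j + K < (c + 1) * K := by
        rcases lt_or_eq_of_le (by omega : (m : Int) - j + K ≤ (c + 1) * K) with h | h
        · exact h
        · exfalso
          apply hc
          refine (pvModEq K hK j m hj).mpr ⟨c.toNat, ?_⟩
          rw [Int.toNat_of_nonneg hc0]
          nlinarith [h]
      have hcq' : PySem.Int.floordiv (((m + 1 : Nat) : Int) - j + K - 1) K = c := by
        rw [PySem.Int.floordiv_eq_iff_of_pos hK]
        push_cast
        constructor
        · linarith [hbr.1]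
        · linarith [hlt]
      rw [hcq', if_neg hc, add_zero]

theorem pvReplicate_getD (n j : Nat) : (List.replicate n (0 : Int)).getD j 0 = 0 := by
  by_cases h : j < n
  · exact List.getD_replicate _ h
  · simp [List.getD_eq_getElem?_getD, h]

theorem pvTri_zero_le (N : Int) (hN : 0 < N) : PySem.Int.floordiv ((0 : Int) * (0 + 1)) 2 ≤ N := by
  have := pvTriEven 0
  omega

theorem pvMain (N K : Int) (hN : 0 < N) (hK : 0 < K) : distributeBags N K = distributeBags_alt N K := by
  -- B's search results
  obtain ⟨hhi_pos, hhi_gt⟩ := pvGrow_spec N N.toNat 1 (by norm_num) (by omega)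
  obtain ⟨hm_le, hm_gt, hm_0⟩ := pvBin_spec N (pvGrow N N.toNat 1).toNat 0 (pvGrow N N.toNat 1) (pvTri_zero_le N hN)
    (fun hle => hhi_gt (le_trans (pvTri_mono (pvGrow N N.toNat 1) (pvGrow N N.toNat 1 + 1) (by omega) (by omega)) hle))
    (by omega) (by omega) (by omega)
  set m := pvBin N (pvGrow N N.toNat 1).toNat 0 (pvGrow N N.toNat 1) with hmdef
  set mn := m.toNat with hmn_def
  have hmn : m = (mn : Int) := by omega
  set r := N - PySem.Int.floordiv (m * (m + 1)) 2 with hrdef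
  have e1 := pvTriEven m
  have e2 := pvTriEven (m + 1)
  have hexp : (m + 1) * (m + 1 + 1) = m * (m + 1) + 2 * (m + 1) := by ring
  have hr0 : 0 ≤ r := by omega
  have hrle : r ≤ m := by
    have h2N : N < PySem.Int.floordiv ((m + 1) * (m + 1 + 1)) 2 := by omega
    omega
  have hstep : 2 * pvStepSum 0 mn = m * (m + 1) := by
    have := pvStepSum_two_mul mn 0
    rw [hmn]
    push_cast at this ⊢
    linarith
  have hNdecomp : N = pvStepSum 0 mn + r := by omega
  -- per-index values of both sides
  have hAlen : (distributeBags N K).length = K.toNat := by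
    unfold distributeBags
    exact pvALoop_len K hK N.toNat _ 0 N (by simp)
  have hAgetD : ∀ j : Nat, (distributeBags N K).getD j 0 =
      pvFull K 0 mn j + (if 0 < r ∧ mn % K.toNat = j then r else 0) := by
    intro j
    unfold distributeBags
    rw [pvALoop_getD K hK N.toNat _ 0 N (by simp) j, pvReplicate_getD, zero_add]
    rw [show pvSpent K N.toNat 0 N j = pvSpent K N.toNat 0 (pvStepSum 0 mn + r) j from by rw [← hNdecomp],
      pvSpent_decomp K hK j mn 0 N.toNat r hr0 (by push_cast; omega) (by rw [← hNdecomp]; omega)]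
    simp only [Nat.zero_add]
  -- B's list
  have hBeq : distributeBags_alt N K =
      (let result := (PySem.List.pyRange 0 K 1).map (fun j =>
        let c := PySem.Int.floordiv (m - j + K - 1) K
        c * (j + 1) + PySem.Int.floordiv (K * c * (c - 1)) 2)
      if 0 < r then
        PySem.List.pySetD result (PySem.Int.mod m K)
          (PySem.List.pyGetD result (PySem.Int.mod m K) 0 + r)
      else result) := by
    unfold distributeBags_alt
    rw [if_neg (by omega)]
  rw [hBeq]
  set f : Int → Int := fun j =>
    PySem.Int.floordiv (m - j + K - 1) K * (j + 1) +
      PySem.Int.floordiv (K * PySem.Int.floordiv (m - j + K - 1) K *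
        (PySem.Int.floordiv (m - j + K - 1) K - 1)) 2 with hfdef
  have hRf : ((PySem.List.pyRange 0 K 1).map (fun j =>
      let c := PySem.Int.floordiv (m - j + K - 1) K
      c * (j + 1) + PySem.Int.floordiv (K * c * (c - 1)) 2)) = (PySem.List.pyRange 0 K 1).map f := rfl
  rw [hRf]
  set R := (PySem.List.pyRange 0 K 1).map f with hRdef
  have hRlen : R.length = K.toNat := by
    rw [hRdef, List.length_map, PySem.List.length_pyRange_one]
    omega
  have hRgetD : ∀ j : Nat, j < K.toNat → R.getD j 0 = f (j : Int) := by
    intro j hj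
    rw [hRdef, PySem.List.pyRange_one]
    simp only [List.map_map, List.getD_eq_getElem?_getD, List.getElem?_map]
    have hj' : j < (K - 0).toNat := by omega
    simp [hj]
  have hfull : ∀ j : Nat, j < K.toNat → f (j : Int) = pvFull K 0 mn j := by
    intro j hj
    rw [hfdef]
    simp only []
    rw [pvFull_closed K hK j hj mn, ← hmn]
  -- final list equality
  by_cases hr : 0 < r
  · rw [if_pos hr]
    have hmodm : PySem.Int.mod m K = ((mn % K.toNat : Nat) : Int) := by
      rw [hmn]; exact pvModNat K hK mn
    have hp : mn % K.toNat < K.toNat := Nat.mod_lt mn (by omega)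
    rw [hmodm, PySem.List.pySetD_natCast, PySem.List.pyGetD_natCast]
    apply List.ext_getElem
    · rw [hAlen, List.length_set, hRlen]
    · intro i h1 h2
      rw [← List.getD_eq_getElem _ 0, ← List.getD_eq_getElem _ 0]
      rw [hAgetD i]
      have hi : i < K.toNat := by omega
      rw [pvGetD_set R _ i _ (by omega)]
      rw [hRgetD _ hp, hRgetD _ hi, hfull _ hp, hfull _ hi]
      by_cases hc : mn % K.toNat = i
      · rw [if_pos hc, if_pos ⟨hr, hc⟩, hc]
      · rw [if_neg hc, if_neg (by tauto)]
        simp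
  · rw [if_neg hr]
    apply List.ext_getElem
    · rw [hAlen, hRlen]
    · intro i h1 h2
      rw [← List.getD_eq_getElem _ 0, ← List.getD_eq_getElem _ 0]
      rw [hAgetD i, hRgetD i (by omega), hfull i (by omega)]
      rw [if_neg (by tauto)]
      simp

-- ===== VERDICT (by name: the statement is the Claim_ definition above) =====
theorem distributeBags_spec : Claim_equal_distributeBags := by
  intro N K _hdom hpre
  unfold Spec_distributeBags
  by_cases hN : N ≤ 0
  · unfold distributeBags distributeBags_alt
    have hN0 : N.toNat = 0 := by omega
    rw [hN0, pvALoop, if_pos hN]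
  · exact pvMain N K (by omega) (by rcases hpre with h | h; exact h; omega)
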